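-- pv_equiv track=rewrite | github.com/SkyD0ge/ELK-logging-scripts | quick_traffic_logger.py | generate_combined_html_table
-- ===== SOURCE A (Python) =====
-- def generate_combined_html_table(title, user_data, bot_data, user_heading, bot_heading):
--     is_ip_table = all("country" in d and "organization" in d for d in user_data + bot_data)
--
--     # Special handling for IP table to remove country/org from bot IPs because table structure is pre defined + extra code for when bot region is to be determined
--     if is_ip_table and "IP" in title:
--         headers = ["User IP", "User Count", "Country", "Organization", "Bot IP", "Bot Count"]
--     elif is_ip_table:
--         headers = ["IP", "User Count", "Country", "Organization", "IP", "Bot Count", "Country", "Organization"]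
--     else:
--         headers = [user_heading, "User Count", bot_heading, "Bot Count"]
--
--     table_style = "border: 1px solid #ccc; border-collapse: collapse; width: 100%; margin-bottom: 20px;"
--     th_style = "background-color: #f2f2f2; text-align: left; padding: 8px; border: 1px solid #ccc;"
--     td_style = "padding: 8px; border: 1px solid #ccc;"
--
--     header_row = "".join(f"<th style='{th_style}'>{h}</th>" for h in headers)
--     rows = ""
--     max_rows = max(len(user_data), len(bot_data))
--
--     for i in range(max_rows):
--         u = user_data[i] if i < len(user_data) else {}
--         b = bot_data[i] if i < len(bot_data) else {}
--
--         # here the country & ip removal is handeled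
--         if is_ip_table and "IP" in title:
--             cells = [
--                 u.get("key", ""), u.get("doc_count", ""), u.get("country", ""), u.get("organization", ""),
--                 b.get("key", ""), b.get("doc_count", "")
--             ]
--         elif is_ip_table:
--             cells = [
--                 u.get("key", ""), u.get("doc_count", ""), u.get("country", ""), u.get("organization", ""),
--                 b.get("key", ""), b.get("doc_count", ""), b.get("country", ""), b.get("organization", "")
--             ]
--         else:
--             cells = [
--                 u.get("key", ""), u.get("doc_count", ""),
--                 b.get("key", ""), b.get("doc_count", "")
--             ]
--
--         row_html = "".join(f"<td style='{td_style}'>{cell}</td>" for cell in cells)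
--         rows += f"<tr>{row_html}</tr>"
--
--     return f"<h3>{title}</h3><table style='{table_style}'><tr>{header_row}</tr>{rows}</table>"
-- ===== SOURCE B (Python) =====
-- def generate_combined_html_table(title, user_data, bot_data, user_heading, bot_heading):
--     is_ip_table = (all("country" in d and "organization" in d for d in user_data)
--                    and all("country" in d and "organization" in d for d in bot_data))
--     # one descriptor per column: (header text, source table, dict key)
--     if is_ip_table and "IP" in title:
--         cols = [("User IP", "u", "key"), ("User Count", "u", "doc_count"),
--                 ("Country", "u", "country"), ("Organization", "u", "organization"),
--                 ("Bot IP", "b", "key"), ("Bot Count", "b", "doc_count")]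
--     elif is_ip_table:
--         cols = [("IP", "u", "key"), ("User Count", "u", "doc_count"),
--                 ("Country", "u", "country"), ("Organization", "u", "organization"),
--                 ("IP", "b", "key"), ("Bot Count", "b", "doc_count"),
--                 ("Country", "b", "country"), ("Organization", "b", "organization")]
--     else:
--         cols = [(user_heading, "u", "key"), ("User Count", "u", "doc_count"),
--                 (bot_heading, "b", "key"), ("Bot Count", "b", "doc_count")]
--     table_style = "border: 1px solid #ccc; border-collapse: collapse; width: 100%; margin-bottom: 20px;"
--     th_style = "background-color: #f2f2f2; text-align: left; padding: 8px; border: 1px solid #ccc;"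
--     td_style = "padding: 8px; border: 1px solid #ccc;"
--     header_row = "".join(f"<th style='{th_style}'>{h}</th>" for h, _src, _key in cols)
--     row_strs = []
--     for i in range(max(len(user_data), len(bot_data))):
--         u = user_data[i] if i < len(user_data) else {}
--         b = bot_data[i] if i < len(bot_data) else {}
--         cells = "".join(f"<td style='{td_style}'>{(u if src == 'u' else b).get(key, '')}</td>"
--                         for _h, src, key in cols)
--         row_strs.append(f"<tr>{cells}</tr>")
--     return (f"<h3>{title}</h3><table style='{table_style}'><tr>{header_row}</tr>"
--             f"{''.join(row_strs)}</table>")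
-- ===== Notes on version B (the rewrite author's own statement) =====
-- stated objective: alternative
-- what changed: Replaces A's three-way branch duplicated inside the row loop by a single table of column descriptors (header, source, key) chosen once; the header row and every data row are then built by one uniform map over that descriptor list.
import Mathlib
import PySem

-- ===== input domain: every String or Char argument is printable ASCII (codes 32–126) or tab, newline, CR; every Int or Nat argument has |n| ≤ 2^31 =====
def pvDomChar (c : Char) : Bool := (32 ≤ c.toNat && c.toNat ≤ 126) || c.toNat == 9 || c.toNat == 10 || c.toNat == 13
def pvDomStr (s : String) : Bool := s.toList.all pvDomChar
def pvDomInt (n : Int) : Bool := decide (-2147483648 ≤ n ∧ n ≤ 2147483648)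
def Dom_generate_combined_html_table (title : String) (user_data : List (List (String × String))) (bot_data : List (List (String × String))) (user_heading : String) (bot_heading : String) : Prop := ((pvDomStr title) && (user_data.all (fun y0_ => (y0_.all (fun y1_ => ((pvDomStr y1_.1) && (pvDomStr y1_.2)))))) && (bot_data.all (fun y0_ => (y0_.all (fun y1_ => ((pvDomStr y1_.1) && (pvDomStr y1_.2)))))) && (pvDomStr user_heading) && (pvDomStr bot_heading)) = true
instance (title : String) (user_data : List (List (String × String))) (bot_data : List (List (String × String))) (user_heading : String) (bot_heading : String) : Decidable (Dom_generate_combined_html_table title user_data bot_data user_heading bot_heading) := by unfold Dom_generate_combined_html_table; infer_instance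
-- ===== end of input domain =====

-- B replaces A's per-row three-way branch by a table of column descriptors (header, source, key)
-- driving both the header row and every data row; objective: alternative decomposition, same output.

-- shared string constants (the same literals appear in Source A and Source B)
def pvTableStyle : String := "border: 1px solid #ccc; border-collapse: collapse; width: 100%; margin-bottom: 20px;"
def pvThStyle : String := "background-color: #f2f2f2; text-align: left; padding: 8px; border: 1px solid #ccc;"
def pvTdStyle : String := "padding: 8px; border: 1px solid #ccc;"

-- ===== PORT A =====
-- "country" in d and "organization" in d  (dict membership)
def pvIsIpDict (d : List (String × String)) : Bool :=
  (PySem.Dict.mk d).contains "country" && (PySem.Dict.mk d).contains "organization"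

-- d.get(k, "")
def pvGet (d : List (String × String)) (k : String) : String :=
  (PySem.Dict.mk d).getD k ""

def generate_combined_html_table (title : String) (user_data : List (List (String × String))) (bot_data : List (List (String × String))) (user_heading : String) (bot_heading : String) : String :=
  let is_ip_table := (user_data ++ bot_data).all pvIsIpDict
  let headers : List String :=
    if is_ip_table && PySem.Str.isIn "IP" title then
      ["User IP", "User Count", "Country", "Organization", "Bot IP", "Bot Count"]
    else if is_ip_table then
      ["IP", "User Count", "Country", "Organization", "IP", "Bot Count", "Country", "Organization"]
    else
      [user_heading, "User Count", bot_heading, "Bot Count"]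
  let header_row := String.join (headers.map (fun h => "<th style='" ++ pvThStyle ++ "'>" ++ h ++ "</th>"))
  let max_rows : Int := max (user_data.length : Int) (bot_data.length : Int)
  let rows := (PySem.List.pyRange 0 max_rows 1).foldl (fun rows i =>
    let u := if i < (user_data.length : Int) then PySem.List.pyGetD user_data i [] else []
    let b := if i < (bot_data.length : Int) then PySem.List.pyGetD bot_data i [] else []
    let cells : List String :=
      if is_ip_table && PySem.Str.isIn "IP" title then
        [pvGet u "key", pvGet u "doc_count", pvGet u "country", pvGet u "organization",
         pvGet b "key", pvGet b "doc_count"]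
      else if is_ip_table then
        [pvGet u "key", pvGet u "doc_count", pvGet u "country", pvGet u "organization",
         pvGet b "key", pvGet b "doc_count", pvGet b "country", pvGet b "organization"]
      else
        [pvGet u "key", pvGet u "doc_count", pvGet b "key", pvGet b "doc_count"]
    let row_html := String.join (cells.map (fun c => "<td style='" ++ pvTdStyle ++ "'>" ++ c ++ "</td>"))
    rows ++ ("<tr>" ++ row_html ++ "</tr>")) ""
  "<h3>" ++ title ++ "</h3><table style='" ++ pvTableStyle ++ "'><tr>" ++ header_row ++ "</tr>" ++ rows ++ "</table>"

-- ===== PORT B =====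
def generate_combined_html_table_alt (title : String) (user_data : List (List (String × String))) (bot_data : List (List (String × String))) (user_heading : String) (bot_heading : String) : String :=
  let is_ip_table := user_data.all pvIsIpDict && bot_data.all pvIsIpDict
  let cols : List (String × String × String) :=
    if is_ip_table && PySem.Str.isIn "IP" title then
      [("User IP", "u", "key"), ("User Count", "u", "doc_count"),
       ("Country", "u", "country"), ("Organization", "u", "organization"),
       ("Bot IP", "b", "key"), ("Bot Count", "b", "doc_count")]
    else if is_ip_table then
      [("IP", "u", "key"), ("User Count", "u", "doc_count"),
       ("Country", "u", "country"), ("Organization", "u", "organization"),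
       ("IP", "b", "key"), ("Bot Count", "b", "doc_count"),
       ("Country", "b", "country"), ("Organization", "b", "organization")]
    else
      [(user_heading, "u", "key"), ("User Count", "u", "doc_count"),
       (bot_heading, "b", "key"), ("Bot Count", "b", "doc_count")]
  let header_row := String.join (cols.map (fun c => "<th style='" ++ pvThStyle ++ "'>" ++ c.1 ++ "</th>"))
  let row_strs := (PySem.List.pyRange 0 (max (user_data.length : Int) (bot_data.length : Int)) 1).map (fun i =>
    let u := if i < (user_data.length : Int) then PySem.List.pyGetD user_data i [] else []
    let b := if i < (bot_data.length : Int) then PySem.List.pyGetD bot_data i [] else []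
    let cells := String.join (cols.map (fun c =>
      "<td style='" ++ pvTdStyle ++ "'>" ++ pvGet (if c.2.1 == "u" then u else b) c.2.2 ++ "</td>"))
    "<tr>" ++ cells ++ "</tr>")
  "<h3>" ++ title ++ "</h3><table style='" ++ pvTableStyle ++ "'><tr>" ++ header_row ++ "</tr>"
    ++ String.join row_strs ++ "</table>"

-- ===== PRECONDITION & SPEC =====
def Spec_generate_combined_html_table (title : String) (user_data : List (List (String × String))) (bot_data : List (List (String × String))) (user_heading : String) (bot_heading : String) (out : String) : Prop := out = generate_combined_html_table_alt title user_data bot_data user_heading bot_heading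
instance (title : String) (user_data : List (List (String × String))) (bot_data : List (List (String × String))) (user_heading : String) (bot_heading : String) (out : String) : Decidable (Spec_generate_combined_html_table title user_data bot_data user_heading bot_heading out) := by unfold Spec_generate_combined_html_table; infer_instance

-- ===== CLAIM (what is proved, stated in full; the proofs are below) =====
def Claim_equal_generate_combined_html_table : Prop := ∀ (title : String) (user_data : List (List (String × String))) (bot_data : List (List (String × String))) (user_heading : String) (bot_heading : String), Dom_generate_combined_html_table title user_data bot_data user_heading bot_heading → Spec_generate_combined_html_table title user_data bot_data user_heading bot_heading (generate_combined_html_table title user_data bot_data user_heading bot_heading)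

-- ===== LEMMAS AND PROOFS =====

-- foldl of ++ with any seed = seed ++ foldl from ""
theorem pv_foldl_str (l : List String) (s : String) :
    l.foldl (fun r t => r ++ t) s = s ++ l.foldl (fun r t => r ++ t) "" := by
  induction l generalizing s with
  | nil => simp
  | cons a l ih =>
      simp only [List.foldl_cons]
      rw [ih (s ++ a), ih ("" ++ a)]
      simp [String.append_assoc]

-- A's string-accumulator loop equals init ++ join of the per-element strings (B's shape).
theorem pv_foldl_append_join {α : Type} (f : α → String) (xs : List α) (init : String) :
    xs.foldl (fun acc i => acc ++ f i) init = init ++ String.join (xs.map f) := by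
  induction xs generalizing init with
  | nil => simp [String.join]
  | cons x xs ih =>
      simp only [List.foldl_cons, List.map_cons, String.join, List.foldl_cons]
      rw [ih, pv_foldl_str (List.map f xs) ("" ++ f x)]
      simp [String.join, String.append_assoc]

-- ===== VERDICT (by name: the statement is the Claim_ definition above) =====
theorem generate_combined_html_table_spec : Claim_equal_generate_combined_html_table := by
  intro title user_data bot_data user_heading bot_heading _
  unfold Spec_generate_combined_html_table
  unfold generate_combined_html_table generate_combined_html_table_alt
  simp only [List.all_append]
  by_cases hip : (user_data.all pvIsIpDict && bot_data.all pvIsIpDict) = true <;>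
  by_cases ht : PySem.Str.isIn "IP" title = true <;>
    simp only [hip, ht, Bool.true_and, Bool.false_and, Bool.and_self, if_true,
      Bool.not_eq_true] at * <;>
    rw [pv_foldl_append_join] <;>
    simp [List.map, String.join, String.append_assoc]
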